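-- pv_equiv track=rewrite | github.com/Th-Underscore/dayna_ss | utils/helpers.py | _is_dict_expandable_to_list
-- ===== SOURCE A (Python) =====
-- def _is_dict_expandable_to_list(data: dict) -> bool:
--     """Check if a dictionary's keys are stringified sequential integers (e.g., "0", "1", "2", ...)."""
--     if not data:
--         return True
--     int_keys = []
--     for k in data.keys():
--         if not isinstance(k, str) or not k.isdigit():
--             return False
--         int_keys.append(int(k))
--     if not int_keys:
--         return True
--     int_keys.sort()
--     return all(int_keys[i] == i for i in range(len(int_keys)))
-- ===== SOURCE B (Python) =====
-- def _is_dict_expandable_to_list(data: dict) -> bool: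
--     """Check if a dictionary's keys are stringified sequential integers (e.g., "0", "1", "2", ...)."""
--     if not data:
--         return True
--     n = len(data)
--     seen = [False] * n
--     for k in data.keys():
--         if not isinstance(k, str) or not k.isdigit():
--             return False
--         v = int(k)
--         if v >= n or seen[v]:
--             return False
--         seen[v] = True
--     return True
-- ===== Notes on version B (the rewrite author's own statement) =====
-- stated objective: alternative
-- what changed: Replaces collect-all-keys + sort + sorted-scan with a single marking pass over a preallocated boolean table: each key's integer is checked against the dict size and its table slot, so the sort and the separate comparison pass disappear.
import Mathlib
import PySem

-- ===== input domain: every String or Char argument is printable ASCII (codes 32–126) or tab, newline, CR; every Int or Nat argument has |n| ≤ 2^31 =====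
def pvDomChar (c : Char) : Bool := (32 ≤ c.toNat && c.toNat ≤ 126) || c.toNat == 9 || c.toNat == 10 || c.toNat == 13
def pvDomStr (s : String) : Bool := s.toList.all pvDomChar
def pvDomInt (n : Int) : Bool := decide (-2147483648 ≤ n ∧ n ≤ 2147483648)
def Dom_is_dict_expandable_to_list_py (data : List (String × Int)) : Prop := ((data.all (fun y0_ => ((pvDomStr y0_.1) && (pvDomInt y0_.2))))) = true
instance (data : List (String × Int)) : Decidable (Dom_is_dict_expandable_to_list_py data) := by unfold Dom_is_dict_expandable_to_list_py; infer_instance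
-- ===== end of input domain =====

-- B replaces A's collect-then-sort-then-scan by one marking pass over a boolean table (objective: alternative algorithm, no sort).

-- ===== PORT A =====
-- A's collection loop: the list of int(k) values, or none at the first non-digit key (A's 'return False');
-- int(k) is ported as (PySem.Int.ofStr? k).getD 0 — exact here: on ASCII strings passing isdigit, int(k) succeeds
def pvA_loop : List (String × Int) → List Int → Option (List Int)
  | [], acc => some acc
  | (k, _) :: rest, acc =>
      if PySem.Str.strIsdigit k then
        pvA_loop rest (acc ++ [(PySem.Int.ofStr? k).getD 0])
      else none

-- keys are str in the Lean type, so A's 'not isinstance(k, str)' test is always False and is dropped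
def is_dict_expandable_to_list_py (data : List (String × Int)) : Bool :=
  if data.isEmpty then true
  else
    match pvA_loop data [] with
    | none => false
    | some int_keys =>
      if int_keys.isEmpty then true
      else
        let s := PySem.List.sorted int_keys (fun x => x)
        (PySem.List.pyRange 0 (PySem.List.len s) 1).all (fun i => PySem.List.pyGet? s i == some i)

-- ===== PORT B =====
-- B's single pass: v = int(k) must be < n and not yet marked in the seen table
def pvB_loop : List (String × Int) → Int → List Bool → Bool
  | [], _, _ => true
  | (k, _) :: rest, n, seen =>
      if !(PySem.Str.strIsdigit k) then false
      else
        let v := (PySem.Int.ofStr? k).getD 0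
        if v ≥ n || seen.getD v.toNat false then false
        else pvB_loop rest n (seen.set v.toNat true)

def is_dict_expandable_to_list_py_alt (data : List (String × Int)) : Bool :=
  if data.isEmpty then true
  else pvB_loop data (PySem.List.len data) (List.replicate data.length false)

-- ===== PRECONDITION & SPEC =====
def Spec_is_dict_expandable_to_list_py (data : List (String × Int)) (out : Bool) : Prop := out = is_dict_expandable_to_list_py_alt data
instance (data : List (String × Int)) (out : Bool) : Decidable (Spec_is_dict_expandable_to_list_py data out) := by unfold Spec_is_dict_expandable_to_list_py; infer_instance

-- ===== CLAIM (what is proved, stated in full; the proofs are below) =====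
def Claim_equal_is_dict_expandable_to_list_py : Prop := ∀ (data : List (String × Int)), Dom_is_dict_expandable_to_list_py data → Spec_is_dict_expandable_to_list_py data (is_dict_expandable_to_list_py data)

-- ===== LEMMAS AND PROOFS =====

-- the value of int(k) as both ports compute it
def pvVal (k : String) : Int := (PySem.Int.ofStr? k).getD 0

lemma pvAux_nonneg (o : Option ℕ) : 0 ≤ (Option.map (fun n : ℤ => n) (o.bind fun a => some ((a:ℤ)))).getD 0 := by
  cases o <;> simp

lemma pvNonneg_ofChars (l : List Char) (h : l.all PySem.Chars.isdigit = true) :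
    0 ≤ (PySem.Int.ofChars? l).getD 0 := by
  unfold PySem.Int.ofChars?
  dsimp only
  split
  · next ds heq =>
    exfalso
    have hm : '-' ∈ l := by
      have h1 : '-' ∈ (List.dropWhile PySem.Int.isIntSpace (List.dropWhile PySem.Int.isIntSpace l).reverse).reverse := by
        rw [heq]; exact List.mem_cons_self
      have h2 := List.mem_reverse.mp h1
      have h3 := (List.dropWhile_sublist _).mem h2
      have h4 := List.mem_reverse.mp h3
      exact (List.dropWhile_sublist _).mem h4
    have := List.all_eq_true.mp h _ hm
    simp [PySem.Chars.isdigit] at this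
  · next ds heq =>
    exfalso
    have hm : '+' ∈ l := by
      have h1 : '+' ∈ (List.dropWhile PySem.Int.isIntSpace (List.dropWhile PySem.Int.isIntSpace l).reverse).reverse := by
        rw [heq]; exact List.mem_cons_self
      have h2 := List.mem_reverse.mp h1
      have h3 := (List.dropWhile_sublist _).mem h2
      have h4 := List.mem_reverse.mp h3
      exact (List.dropWhile_sublist _).mem h4
    have := List.all_eq_true.mp h _ hm
    simp [PySem.Chars.isdigit] at this
  · exact pvAux_nonneg _

lemma pvNonneg (k : String) (h : PySem.Str.strIsdigit k = true) : 0 ≤ pvVal k := by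
  rw [PySem.Str.strIsdigit_eq, PySem.Chars.strIsdigit] at h
  exact pvNonneg_ofChars _ ((Bool.and_eq_true _ _).mp h).2

lemma pvA_loop_eq (data : List (String × Int)) (acc : List Int) :
    pvA_loop data acc =
      if data.all (fun p => PySem.Str.strIsdigit p.1) then some (acc ++ data.map (fun p => pvVal p.1)) else none := by
  induction data generalizing acc with
  | nil => simp [pvA_loop]
  | cons p rest ih =>
    obtain ⟨k, w⟩ := p
    by_cases hk : PySem.Str.strIsdigit k = true
    · rw [pvA_loop, if_pos hk, ih, List.all_cons, hk, Bool.true_and]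
      by_cases hr : (rest.all fun p => PySem.Str.strIsdigit p.1) = true
      · rw [if_pos hr, if_pos hr, List.map_cons, List.append_assoc, List.singleton_append]
        rfl
      · rw [if_neg hr, if_neg hr]
    · have hk' : ¬ PySem.Chars.strIsdigit k.toList = true := by rwa [PySem.Str.strIsdigit_eq] at hk
      simp [pvA_loop, hk']

lemma pvRangeCheck_iff (s : List Int) :
    ((PySem.List.pyRange 0 (PySem.List.len s) 1).all (fun i => PySem.List.pyGet? s i == some i) = true)
      ↔ s = PySem.List.pyRange 0 (s.length : Int) 1 := by
  rw [PySem.List.len_eq, List.all_eq_true]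
  constructor
  · intro h
    apply List.ext_getElem
    · rw [PySem.List.length_pyRange_one]; omega
    · intro k hk hk2
      have hmem : (k : Int) ∈ PySem.List.pyRange 0 (s.length : Int) 1 :=
        PySem.List.mem_pyRange_one.mpr (by constructor <;> omega)
      have := h _ hmem
      rw [PySem.List.pyGet?_natCast] at this
      have hsome : s[k]? = some (k : Int) := by simpa using this
      rw [PySem.List.getElem_pyRange_one]
      have := List.getElem?_eq_getElem hk ▸ hsome
      simp at this
      omega
  · intro h i hi
    have hb := PySem.List.mem_pyRange_one.mp hi
    rw [PySem.List.pyGet?_of_nonneg _ hb.1]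
    rw [h, PySem.List.getElem?_pyRange_one]
    have : i.toNat < ((s.length : Int) - 0).toNat := by omega
    rw [if_pos this]
    simp
    omega

lemma pvPerm_iff (vals : List Int) (hpos : ∀ v ∈ vals, 0 ≤ v) :
    vals.Perm (PySem.List.pyRange 0 (vals.length : Int) 1)
      ↔ vals.Nodup ∧ ∀ v ∈ vals, v < (vals.length : Int) := by
  constructor
  · intro h
    refine ⟨h.nodup_iff.mpr (PySem.List.nodup_pyRange_one 0 _), fun v hv => ?_⟩
    exact (PySem.List.mem_pyRange_one.mp (h.mem_iff.mp hv)).2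
  · rintro ⟨hnd, hbd⟩
    refine (List.subperm_of_subset hnd fun v hv =>
      PySem.List.mem_pyRange_one.mpr ⟨hpos v hv, hbd v hv⟩).perm_of_length_le ?_
    rw [PySem.List.length_pyRange_one]; omega

lemma pvSorted_iff (vals : List Int) (n : Int) :
    PySem.List.sorted vals (fun x => x) = PySem.List.pyRange 0 n 1
      ↔ vals.Perm (PySem.List.pyRange 0 n 1) := by
  constructor
  · intro h
    have hp := PySem.List.sorted_perm vals (fun x => x) false
    rw [h] at hp
    exact hp.symm
  · intro h
    exact PySem.List.sorted_eq_of_perm_of_pairwise_lt vals _ (fun x => x) h.symm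
      (PySem.List.pairwise_lt_pyRange_one 0 n)

lemma pvB_loop_cons (k : String) (w : Int) (rest : List (String × Int)) (n : Int) (seen : List Bool) :
    pvB_loop ((k, w) :: rest) n seen =
      if PySem.Str.strIsdigit k then
        (if (pvVal k ≥ n ∨ seen.getD (pvVal k).toNat false = true) then false
         else pvB_loop rest n (seen.set (pvVal k).toNat true))
      else false := by
  rw [pvB_loop]
  simp [pvVal]

lemma pvB_loop_iff (data : List (String × Int)) (n : Int) (seen : List Bool)
    (hsz : seen.length = n.toNat) (hn : 0 ≤ n) :
    pvB_loop data n seen = true ↔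
      ((∀ p ∈ data, PySem.Str.strIsdigit p.1 = true) ∧
       (data.map (fun p => pvVal p.1)).Nodup ∧
       (∀ v ∈ data.map (fun p => pvVal p.1), v < n ∧ seen.getD v.toNat false = false)) := by
  induction data generalizing seen with
  | nil => simp [pvB_loop]
  | cons p rest ih =>
    obtain ⟨k, w⟩ := p
    rw [pvB_loop_cons]
    by_cases hk : PySem.Str.strIsdigit k = true
    · rw [if_pos hk]
      have hv0 : (0:Int) ≤ pvVal k := pvNonneg k hk
      by_cases hbad : (pvVal k ≥ n ∨ seen.getD (pvVal k).toNat false = true)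
      · rw [if_pos hbad]
        simp only [Bool.false_eq_true, false_iff]
        rintro ⟨_, _, h3⟩
        have hmem : pvVal k ∈ List.map (fun p => pvVal p.1) ((k, w) :: rest) := by simp
        have := h3 (pvVal k) hmem
        rcases hbad with h1 | h1
        · omega
        · rw [this.2] at h1; exact Bool.false_ne_true h1
      · rw [if_neg hbad]
        have hvn : pvVal k < n := by omega
        have hseen' : seen.getD (pvVal k).toNat false = false := by
          cases h : seen.getD (pvVal k).toNat false
          · rfl
          · exact absurd (Or.inr h) hbad
        have hlt : (pvVal k).toNat < seen.length := by omega
        rw [ih _ (by rw [List.length_set]; exact hsz)]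
        constructor
        · rintro ⟨h1, h2, h3⟩
          have hnotmem : pvVal k ∉ rest.map (fun p => pvVal p.1) := by
            intro hmem
            have := (h3 _ hmem).2
            rw [List.getD_eq_getElem?_getD, List.getElem?_set, if_pos rfl, if_pos hlt] at this
            simp at this
          refine ⟨?_, ?_, ?_⟩
          · rintro p hp
            rcases List.mem_cons.mp hp with rfl | hp'
            · exact hk
            · exact h1 p hp'
          · simp only [List.map_cons, List.nodup_cons]
            exact ⟨hnotmem, h2⟩
          · intro v hv
            simp only [List.map_cons, List.mem_cons] at hv
            rcases hv with rfl | hv'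
            · exact ⟨hvn, hseen'⟩
            · have h3v := h3 _ hv'
              refine ⟨h3v.1, ?_⟩
              have hne : v ≠ pvVal k := fun h => by subst h; exact hnotmem hv'
              have hvpos : 0 ≤ v := by
                obtain ⟨q, hq, rfl⟩ := List.mem_map.mp hv'
                exact pvNonneg _ (h1 q hq)
              have hneNat : (pvVal k).toNat ≠ v.toNat := by omega
              have := h3v.2
              rwa [List.getD_eq_getElem?_getD, List.getElem?_set, if_neg hneNat,
                ← List.getD_eq_getElem?_getD] at this
        · rintro ⟨h1, h2, h3⟩
          simp only [List.map_cons, List.nodup_cons] at h2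
          refine ⟨fun p hp => h1 p (List.mem_cons_of_mem _ hp), h2.2, ?_⟩
          intro v hv
          have h3v := h3 v (by simp only [List.map_cons, List.mem_cons]; exact Or.inr hv)
          refine ⟨h3v.1, ?_⟩
          have hne : v ≠ pvVal k := fun h => h2.1 (h ▸ hv)
          have hvpos : 0 ≤ v := by
            obtain ⟨q, hq, rfl⟩ := List.mem_map.mp hv
            exact pvNonneg _ (h1 q (List.mem_cons_of_mem _ hq))
          have hneNat : (pvVal k).toNat ≠ v.toNat := by omega
          rw [List.getD_eq_getElem?_getD, List.getElem?_set, if_neg hneNat,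
            ← List.getD_eq_getElem?_getD]
          exact h3v.2
    · rw [if_neg hk]
      simp only [Bool.false_eq_true, false_iff]
      rintro ⟨h1, _, _⟩
      exact absurd (h1 (k, w) List.mem_cons_self) hk

lemma pvRepl_getD (m i : ℕ) : (List.replicate m false).getD i false = false := by
  rw [List.getD_eq_getElem?_getD, List.getElem?_replicate]
  split <;> rfl

theorem pv_main (data : List (String × Int)) :
    is_dict_expandable_to_list_py data = is_dict_expandable_to_list_py_alt data := by
  by_cases hemp : data.isEmpty = true
  · rw [is_dict_expandable_to_list_py, is_dict_expandable_to_list_py_alt, if_pos hemp, if_pos hemp]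
  · rw [is_dict_expandable_to_list_py, is_dict_expandable_to_list_py_alt, if_neg hemp, if_neg hemp]
    have hne : data ≠ [] := by
      intro h; subst h; exact hemp rfl
    -- the B side, characterized
    have hB : pvB_loop data (PySem.List.len data) (List.replicate data.length false) = true ↔
        ((∀ p ∈ data, PySem.Str.strIsdigit p.1 = true) ∧
         (data.map (fun p => pvVal p.1)).Nodup ∧
         (∀ v ∈ data.map (fun p => pvVal p.1), v < (data.length : Int))) := by
      rw [PySem.List.len_eq,
        pvB_loop_iff data (data.length : Int) _ (by simp) (by positivity)]
      constructor
      · rintro ⟨h1, h2, h3⟩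
        exact ⟨h1, h2, fun v hv => (h3 v hv).1⟩
      · rintro ⟨h1, h2, h3⟩
        exact ⟨h1, h2, fun v hv => ⟨h3 v hv, pvRepl_getD _ _⟩⟩
    rw [pvA_loop_eq]
    by_cases hall : (data.all fun p => PySem.Str.strIsdigit p.1) = true
    · rw [if_pos hall]
      dsimp only
      rw [List.nil_append]
      have hall' : ∀ p ∈ data, PySem.Str.strIsdigit p.1 = true := List.all_eq_true.mp hall
      have hpos : ∀ v ∈ data.map (fun p => pvVal p.1), 0 ≤ v := by
        rintro v hv
        obtain ⟨q, hq, rfl⟩ := List.mem_map.mp hv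
        exact pvNonneg _ (hall' q hq)
      have hvne : (data.map (fun p => pvVal p.1)).isEmpty = false := by
        cases data
        · exact absurd rfl hne
        · rfl
      rw [hvne]
      rw [if_neg (by simp : ¬ (false = true))]
      have hlens : (PySem.List.sorted (data.map (fun p => pvVal p.1)) (fun x => x)).length
          = (data.map (fun p => pvVal p.1)).length := PySem.List.length_sorted _ _ _
      have hA : ((PySem.List.pyRange 0
            (PySem.List.len (PySem.List.sorted (data.map (fun p => pvVal p.1)) (fun x => x))) 1).all
            (fun i => PySem.List.pyGet? (PySem.List.sorted (data.map (fun p => pvVal p.1)) (fun x => x)) i == some i) = true)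
          ↔ ((data.map (fun p => pvVal p.1)).Nodup ∧
             ∀ v ∈ data.map (fun p => pvVal p.1), v < (data.length : Int)) := by
        rw [pvRangeCheck_iff, hlens, pvSorted_iff, pvPerm_iff _ hpos]
        simp
      rw [Bool.eq_iff_iff, hA, hB]
      constructor
      · rintro ⟨h2, h3⟩; exact ⟨hall', h2, h3⟩
      · rintro ⟨_, h2, h3⟩; exact ⟨h2, h3⟩
    · rw [if_neg hall]
      have : ¬ (pvB_loop data (PySem.List.len data) (List.replicate data.length false) = true) := by
        rw [hB]
        rintro ⟨h1, _, _⟩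
        exact hall (List.all_eq_true.mpr h1)
      cases h : pvB_loop data (PySem.List.len data) (List.replicate data.length false)
      · rfl
      · exact absurd h this

-- ===== VERDICT (by name: the statement is the Claim_ definition above) =====
theorem is_dict_expandable_to_list_py_spec : Claim_equal_is_dict_expandable_to_list_py := by
  intro data _
  unfold Spec_is_dict_expandable_to_list_py
  exact pv_main data
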